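-- pv_equiv track=rewrite | github.com/ToolsForAncientChineseText/Word-segmentation | utils.py | label2text
-- ===== SOURCE A (Python) =====
-- def label2text(text, label):
--     res = []
--     label = label.split(' ')[1:-1]
--     idx = 0
--     for i in range(len(label)):
--         if label[i] != "[BOS]" and label[i] != "[IOS]":
--             continue
--         if idx >= len(text):
--             break
--         if label[i] == "[BOS]" and res != []:
--             res.append(' ')
--         res.append(text[idx])
--         idx += 1
--     return "".join(res)
-- ===== SOURCE B (Python) =====
-- def label2text(text, label):
--     tags = [t for t in label.split(' ')[1:-1] if t in ('[BOS]', '[IOS]')]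
--     n = min(len(tags), len(text))
--     cuts = [0] + [i for i in range(1, n) if tags[i] == '[BOS]'] + [n]
--     return ' '.join(text[a:b] for a, b in zip(cuts, cuts[1:]))
-- ===== Notes on version B (the rewrite author's own statement) =====
-- stated objective: alternative
-- what changed: B is staged: it filters the tag tokens, computes the list of word-boundary cut indices (0, each later [BOS] position within the min length, n) in one pass, then materialises the words as text slices between consecutive cuts and joins them with spaces - instead of A's single index-driven loop that interleaves explicit space tokens into a flat character list.
import Mathlib
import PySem

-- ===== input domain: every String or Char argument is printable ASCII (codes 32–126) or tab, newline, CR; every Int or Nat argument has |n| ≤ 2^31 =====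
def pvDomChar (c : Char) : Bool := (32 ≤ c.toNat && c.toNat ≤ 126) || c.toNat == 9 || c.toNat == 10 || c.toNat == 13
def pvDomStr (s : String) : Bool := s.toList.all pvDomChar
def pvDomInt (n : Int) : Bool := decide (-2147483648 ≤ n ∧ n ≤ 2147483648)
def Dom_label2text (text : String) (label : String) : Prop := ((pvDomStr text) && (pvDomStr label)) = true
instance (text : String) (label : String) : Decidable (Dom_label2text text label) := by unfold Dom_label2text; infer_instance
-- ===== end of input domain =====

-- B computes the list of word-boundary cut indices first and then slices the text between
-- consecutive cuts, instead of A's single index loop interleaving space tokens; objective: alternative.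

-- ===== PORT A =====
-- A's loop: skip non-tag labels, break when the text is exhausted (idx >= len(text)
-- is modelled by consuming the remaining text list), prepend ' ' before a [BOS] char
-- when res is nonempty.
def label2textGoA : List String → List Char → List Char → List Char
  | [], _, res => res
  | l :: ls, txt, res =>
    if l ≠ "[BOS]" ∧ l ≠ "[IOS]" then label2textGoA ls txt res
    else
      match txt with
      | [] => res
      | c :: rest =>
        label2textGoA ls rest
          (res ++ (if l = "[BOS]" ∧ res ≠ [] then [' ', c] else [c]))

def label2text (text : String) (label : String) : String :=
  String.ofList (label2textGoA
    (PySem.List.slice ((PySem.Str.split? label " ").getD []) (some 1) (some (-1)))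
    text.toList [])

-- ===== PORT B =====
-- Source B line by line: tags = filtered labels; n = min(len(tags), len(text));
-- cuts = [0] + [i for i in range(1, n) if tags[i] == '[BOS]'] + [n];
-- ' '.join(text[a:b] for a, b in zip(cuts, cuts[1:])).
def label2text_alt (text : String) (label : String) : String :=
  let tags := (PySem.List.slice ((PySem.Str.split? label " ").getD []) (some 1) (some (-1))).filter
      (fun t => t = "[BOS]" ∨ t = "[IOS]")
  let txt := text.toList
  let n : Int := min ((tags.length : Int)) ((txt.length : Int))
  let cuts : List Int :=
    0 :: (((PySem.List.pyRange 1 n 1).filter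
            (fun i => PySem.List.pyGetD tags i "" = "[BOS]")) ++ [n])
  String.ofList (PySem.Chars.join [' ']
    ((cuts.zip cuts.tail).map (fun p => PySem.List.slice txt (some p.1) (some p.2))))

-- ===== PRECONDITION & SPEC =====
def Spec_label2text (text : String) (label : String) (out : String) : Prop := out = label2text_alt text label
instance (text : String) (label : String) (out : String) : Decidable (Spec_label2text text label out) := by unfold Spec_label2text; infer_instance

-- ===== CLAIM (what is proved, stated in full; the proofs are below) =====
def Claim_equal_label2text : Prop := ∀ (text : String) (label : String), Dom_label2text text label → Spec_label2text text label (label2text text label)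

-- ===== LEMMAS AND PROOFS =====

-- A's recursion restricted to the tag labels, paired with the text chars.
def label2textGoA2 : List (String × Char) → List Char → List Char
  | [], res => res
  | (t, c) :: rest, res =>
    label2textGoA2 rest (res ++ (if t = "[BOS]" ∧ res ≠ [] then [' ', c] else [c]))

lemma goA_eq_goA2 (ls : List String) : ∀ (txt : List Char) (res : List Char),
    label2textGoA ls txt res
      = label2textGoA2 ((ls.filter (fun t => t = "[BOS]" ∨ t = "[IOS]")).zip txt) res := by
  induction ls with
  | nil => intro txt res; simp [label2textGoA, label2textGoA2]
  | cons l ls ih =>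
    intro txt res
    by_cases h : l = "[BOS]" ∨ l = "[IOS]"
    · have hne : ¬ (l ≠ "[BOS]" ∧ l ≠ "[IOS]") := by tauto
      cases txt with
      | nil => simp [label2textGoA, hne, h, label2textGoA2]
      | cons c rest => simp [label2textGoA, hne, h, label2textGoA2, ih]
    · have hne : l ≠ "[BOS]" ∧ l ≠ "[IOS]" := by tauto
      simp [label2textGoA, hne, ih]

-- with a nonempty accumulator, A appends a space before exactly every [BOS] char
lemma goA2_flat (ps : List (String × Char)) : ∀ (res : List Char), res ≠ [] →
    label2textGoA2 ps res
      = res ++ ps.flatMap (fun p => if p.1 = "[BOS]" then [' ', p.2] else [p.2]) := by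
  induction ps with
  | nil => intro res _; simp [label2textGoA2]
  | cons p ps ih =>
    obtain ⟨t, c⟩ := p
    intro res hres
    simp only [label2textGoA2]
    rw [ih (res ++ (if t = "[BOS]" ∧ res ≠ [] then [' ', c] else [c]))
        (by by_cases ht : t = "[BOS]" <;> simp [ht, hres])]
    by_cases ht : t = "[BOS]" <;> simp [ht, hres]

-- zipped flatMap as an index flatMap over range
lemma zip_flatMap_idx (f : String × Char → List Char) :
    ∀ (tags : List String) (txt : List Char),
      (tags.zip txt).flatMap f
        = (List.range (min tags.length txt.length)).flatMap
            (fun i => f (tags.getD i "", txt.getD i ' ')) := by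
  intro tags
  induction tags with
  | nil => intro txt; simp
  | cons t ts ih =>
    intro txt
    cases txt with
    | nil => simp
    | cons c cs =>
      have hmin : min (t :: ts).length (c :: cs).length = min ts.length cs.length + 1 := by
        simp [Nat.succ_min_succ]
      rw [hmin, List.range_succ_eq_map]
      simp only [List.zip_cons_cons, List.flatMap_cons, List.flatMap_map, List.getD_cons_zero,
        List.getD_cons_succ, ih]

-- one segment of text between two cut indices
def pvSeg (txt : List Char) (p : Nat × Nat) : List Char := (txt.drop p.1).take (p.2 - p.1)

-- is the tag at index i a word-begin tag
def pvBos (tags : List String) : Nat → Bool := fun i => decide (tags.getD i "" = "[BOS]")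

lemma seg_cons (txt : List Char) (a b : Nat) (ha : a < txt.length) (hab : a < b) :
    pvSeg txt (a, b) = txt.getD a ' ' :: pvSeg txt (a + 1, b) := by
  have hd : txt.drop a = txt[a] :: txt.drop (a + 1) := List.drop_eq_getElem_cons ha
  have hb : b - a = (b - (a + 1)) + 1 := by omega
  show (txt.drop a).take (b - a) = txt.getD a ' ' :: (txt.drop (a + 1)).take (b - (a + 1))
  rw [hd, hb, List.take_succ_cons, List.getD_eq_getElem txt ' ' ha]

lemma join_cons_head (sep : List Char) (c : Char) (s : List Char) (rest : List (List Char)) :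
    PySem.Chars.join sep ((c :: s) :: rest) = c :: PySem.Chars.join sep (s :: rest) := by
  cases rest with
  | nil => simp [PySem.Chars.join_singleton]
  | cons r rs => simp [PySem.Chars.join_cons_cons]

-- THE core lemma: joining the segments cut at a, the bos-positions of (a, a+m], and a+m+1
-- equals the character at a followed by the space-interleaved characters after it.
lemma segJoin (txt : List Char) (bos : Nat → Bool) :
    ∀ (m a : Nat), a + m < txt.length →
      PySem.Chars.join [' ']
        (((a :: ((List.range' (a+1) m).filter bos ++ [a+m+1])).zip
            ((List.range' (a+1) m).filter bos ++ [a+m+1])).map (pvSeg txt))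
      = txt.getD a ' ' ::
          (List.range' (a+1) m).flatMap
            (fun i => if bos i then [' ', txt.getD i ' '] else [txt.getD i ' ']) := by
  intro m
  induction m with
  | zero =>
    intro a ha
    have hseg : pvSeg txt (a, a + 0 + 1) = [txt.getD a ' '] := by
      rw [seg_cons txt a (a + 0 + 1) ha (by omega)]
      simp [pvSeg]
    simp only [List.range'_zero, List.filter_nil, List.nil_append, List.flatMap_nil]
    have hz : ((a :: [a + 0 + 1]).zip [a + 0 + 1]).map (pvSeg txt) = [pvSeg txt (a, a + 0 + 1)] := rfl
    rw [hz, PySem.Chars.join_singleton, hseg]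
  | succ m ih =>
    intro a ha
    rw [List.range'_succ]
    by_cases hb : bos (a + 1)
    · have hfc : ((a+1) :: List.range' (a+1+1) m).filter bos
          = (a+1) :: (List.range' (a+1+1) m).filter bos := by
        simp [hb]
      rw [hfc]
      simp only [List.cons_append]
      have hIH := ih (a+1) (by omega)
      have hshift : a + 1 + m + 1 = a + (m+1) + 1 := by omega
      rw [hshift] at hIH
      set R := (List.range' (a+1+1) m).filter bos ++ [a + (m+1) + 1] with hR
      have hzip : ((a :: (a+1) :: R).zip ((a+1) :: R)).map (pvSeg txt)
          = pvSeg txt (a, a+1) :: (((a+1) :: R).zip R).map (pvSeg txt) := by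
        simp [List.zip_cons_cons]
      have hseg : pvSeg txt (a, a+1) = [txt.getD a ' '] := by
        rw [seg_cons txt a (a+1) (by omega) (by omega)]; simp [pvSeg]
      rw [hzip, hseg]
      have hRne : R ≠ [] := by simp [hR]
      obtain ⟨r, rs, hrs⟩ := List.exists_cons_of_ne_nil hRne
      have hzip2 : (((a+1) :: R).zip R).map (pvSeg txt)
          = pvSeg txt (a+1, r) :: ((r :: rs).zip rs).map (pvSeg txt) := by
        rw [hrs]; simp [List.zip_cons_cons]
      rw [hzip2, PySem.Chars.join_cons_cons, ← hzip2, hIH]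
      simp [hb]
    · have hfc : ((a+1) :: List.range' (a+1+1) m).filter bos
          = (List.range' (a+1+1) m).filter bos := by
        simp [hb]
      rw [hfc]
      have hIH := ih (a+1) (by omega)
      have hshift : a + 1 + m + 1 = a + (m+1) + 1 := by omega
      rw [hshift] at hIH
      set R := (List.range' (a+1+1) m).filter bos ++ [a + (m+1) + 1] with hR
      have hRne : R ≠ [] := by simp [hR]
      obtain ⟨r, rs, hrs⟩ := List.exists_cons_of_ne_nil hRne
      have har : a + 1 < r := by
        have hrR : r ∈ R := by rw [hrs]; exact List.mem_cons_self
        rw [hR] at hrR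
        rcases List.mem_append.mp hrR with h | h
        · have h2 := (List.mem_filter.mp h).1
          have := (List.mem_range'_1.mp h2).1
          omega
        · simp at h; omega
      have hzip : ((a :: R).zip R).map (pvSeg txt)
          = pvSeg txt (a, r) :: ((r :: rs).zip rs).map (pvSeg txt) := by
        rw [hrs]; simp [List.zip_cons_cons]
      have hzip2 : (((a+1) :: R).zip R).map (pvSeg txt)
          = pvSeg txt (a+1, r) :: ((r :: rs).zip rs).map (pvSeg txt) := by
        rw [hrs]; simp [List.zip_cons_cons]
      rw [hzip, seg_cons txt a r (by omega) (by omega), join_cons_head, ← hzip2, hIH]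
      simp [hb]

-- the whole equality, over the already-filtered tag list and the text chars
lemma main_eq (tags : List String) (txt : List Char) :
    label2textGoA2 (tags.zip txt) []
      = PySem.Chars.join [' ']
          ((((0 : Int) :: (((PySem.List.pyRange 1 (min ((tags.length : Int)) ((txt.length : Int))) 1).filter
                (fun i => PySem.List.pyGetD tags i "" = "[BOS]")) ++ [min ((tags.length : Int)) ((txt.length : Int))])).zip
              ((((PySem.List.pyRange 1 (min ((tags.length : Int)) ((txt.length : Int))) 1).filter
                (fun i => PySem.List.pyGetD tags i "" = "[BOS]")) ++ [min ((tags.length : Int)) ((txt.length : Int))]))).map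
            (fun p => PySem.List.slice txt (some p.1) (some p.2))) := by
  obtain ⟨N, hN⟩ : ∃ N, N = min tags.length txt.length := ⟨_, rfl⟩
  have hcast : min ((tags.length : Int)) ((txt.length : Int)) = ((N : Nat) : Int) := by
    rw [hN]; simp
  rw [hcast]
  have hrange : PySem.List.pyRange 1 ((N : Nat) : Int) 1
      = (List.range' 1 (N - 1)).map (fun a : Nat => (a : Int)) := by
    rw [PySem.List.pyRange_one, show ((((N : Nat) : Int)) - 1).toNat = N - 1 by omega,
      List.range'_eq_map_range, List.map_map]
    refine List.map_congr_left (fun k _ => ?_)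
    show (1 : Int) + (k : Int) = ((1 + k : Nat) : Int)
    push_cast; ring
  rw [hrange, List.filter_map]
  have hpc : ((fun i : Int => decide (PySem.List.pyGetD tags i "" = "[BOS]"))
        ∘ (fun a : Nat => (a : Int))) = pvBos tags := by
    funext j; simp [pvBos]
  rw [hpc]
  have hcuts : (0 : Int) :: (((List.range' 1 (N - 1)).filter (pvBos tags)).map (fun a : Nat => (a : Int))
        ++ [((N : Nat) : Int)])
      = ((0 :: ((List.range' 1 (N - 1)).filter (pvBos tags) ++ [N])).map (fun a : Nat => (a : Int))) := by
    simp
  have htl : ((List.range' 1 (N - 1)).filter (pvBos tags)).map (fun a : Nat => (a : Int))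
        ++ [((N : Nat) : Int)]
      = (((List.range' 1 (N - 1)).filter (pvBos tags) ++ [N]).map (fun a : Nat => (a : Int))) := by
    simp
  rw [hcuts, htl]
  have hseglist : ∀ (L : List Nat),
      ((((0 :: L).map (fun a : Nat => (a : Int))).zip (L.map (fun a : Nat => (a : Int)))).map
          (fun p : Int × Int => PySem.List.slice txt (some p.1) (some p.2)))
        = ((0 :: L).zip L).map (pvSeg txt) := by
    intro L
    rw [List.zip_map, List.map_map]
    refine List.map_congr_left (fun q _ => ?_)
    obtain ⟨a, b⟩ := q
    simp [Function.comp, Prod.map, pvSeg, PySem.List.slice_natCast]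
  rw [hseglist]
  rcases Nat.eq_zero_or_pos N with h0 | hpos
  · have hz : tags.zip txt = [] := by
      rw [← List.length_eq_zero_iff, List.length_zip]; omega
    rw [h0]
    have hz2 : ((0 :: (((List.range' 1 (0 - 1)).filter (pvBos tags)) ++ [0])).zip
          (((List.range' 1 (0 - 1)).filter (pvBos tags)) ++ [0])).map (pvSeg txt)
        = [pvSeg txt (0, 0)] := by
      simp [List.range'_zero]
    rw [hz, hz2, PySem.Chars.join_singleton]
    simp [label2textGoA2, pvSeg]
  · obtain ⟨m, hm⟩ : ∃ m, N = m + 1 := ⟨N - 1, by omega⟩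
    obtain ⟨t0, ts, rfl⟩ := List.exists_cons_of_ne_nil
      (show tags ≠ [] by intro h; rw [h] at hN; simp at hN; omega)
    obtain ⟨c0, cs, rfl⟩ := List.exists_cons_of_ne_nil
      (show txt ≠ [] by intro h; rw [h] at hN; simp at hN; omega)
    rw [List.zip_cons_cons]
    have hstep1 : label2textGoA2 ((t0, c0) :: (ts.zip cs)) [] = label2textGoA2 (ts.zip cs) [c0] := by
      simp [label2textGoA2]
    rw [hstep1, goA2_flat _ [c0] (by simp), zip_flatMap_idx]
    have hmin : min ts.length cs.length = m := by
      simp only [List.length_cons, Nat.succ_min_succ] at hN; omega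
    rw [hmin]
    have h0m : 0 + m < (c0 :: cs).length := by
      have h1 : N ≤ (c0 :: cs).length := by rw [hN]; exact Nat.min_le_right _ _
      simp at h1 ⊢; omega
    have hsj := segJoin (c0 :: cs) (pvBos (t0 :: ts)) m 0 h0m
    simp only [Nat.zero_add] at hsj
    have hN1 : N - 1 = m := by omega
    rw [hN1, hm, hsj]
    rw [List.range'_eq_map_range, List.flatMap_map]
    simp only [pvBos, List.getD_cons_zero, decide_eq_true_eq]
    have hflat : (fun a : Nat => if (t0 :: ts).getD (1 + a) "" = "[BOS]"
            then [' ', (c0 :: cs).getD (1 + a) ' '] else [(c0 :: cs).getD (1 + a) ' '])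
        = (fun i : Nat => if (ts.getD i "", cs.getD i ' ').1 = "[BOS]"
            then [' ', (ts.getD i "", cs.getD i ' ').2] else [(ts.getD i "", cs.getD i ' ').2]) := by
      funext i
      rw [show 1 + i = i + 1 from Nat.add_comm 1 i]
      simp
    simp only [hflat]
    simp

-- ===== VERDICT (by name: the statement is the Claim_ definition above) =====
theorem label2text_spec : Claim_equal_label2text := by
  intro text label _
  show label2text text label = label2text_alt text label
  unfold label2text label2text_alt
  rw [goA_eq_goA2]
  exact congrArg String.ofList (main_eq _ _)
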